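-- pv_equiv track=rewrite | github.com/zhy2249/sparse-transform-codeing | CABAC_Estimator.py | diag_scan_order
-- ===== SOURCE A (Python) =====
-- from typing import List, Sequence
--
-- def diag_scan_order(width: int, height: int) -> List[int]:
--     """Generate diagonal scan order."""
--     order = []
--     x = y = 0
--     for _ in range(width * height):
--         order.append(y * width + x)
--         if x == width - 1 or y == 0:
--             y += x + 1
--             x = 0
--             if y >= height:
--                 x += y - (height - 1)
--                 y = height - 1
--         else:
--             x += 1
--             y -= 1
--     return order
-- ===== SOURCE B (Python) =====
-- from typing import List
--
-- def diag_scan_order(width: int, height: int) -> List[int]: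
--     """Generate diagonal scan order by enumerating each anti-diagonal directly."""
--     if width <= 0 or height <= 0:
--         return []
--     order = []
--     for d in range(width + height - 1):
--         for x in range(max(0, d - height + 1), min(width - 1, d) + 1):
--             order.append((d - x) * width + x)
--     return order
-- ===== Notes on version B (the rewrite author's own statement) =====
-- stated objective: simpler
-- what changed: Replaced the stateful cursor (a single (x,y) walker with a branch that either steps down-left or jumps-and-clamps to the next diagonal's start) by direct enumeration of each anti-diagonal d with closed-form x-bounds max(0,d-height+1)..min(width-1,d).
-- intended difference: When width < 0 and height < 0 (so width*height > 0), A's loop still runs width*height steps and returns a nonempty list of meaningless indices for a nonexistent grid, while B returns [], the intended scan order of an empty grid. — e.g. on diag_scan_order(-1, -1): A returns [0], B returns []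
import Mathlib
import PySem

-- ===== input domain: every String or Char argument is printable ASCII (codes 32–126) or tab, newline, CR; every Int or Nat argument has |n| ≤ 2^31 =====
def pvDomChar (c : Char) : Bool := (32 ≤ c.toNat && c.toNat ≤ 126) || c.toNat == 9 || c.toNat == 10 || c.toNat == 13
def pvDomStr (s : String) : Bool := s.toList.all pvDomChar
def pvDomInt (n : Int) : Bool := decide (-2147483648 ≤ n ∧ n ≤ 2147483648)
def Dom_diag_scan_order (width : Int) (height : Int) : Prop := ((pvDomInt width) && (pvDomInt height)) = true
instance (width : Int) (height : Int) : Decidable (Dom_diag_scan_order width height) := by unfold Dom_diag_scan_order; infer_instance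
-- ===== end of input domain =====

-- B enumerates each anti-diagonal with closed-form bounds instead of A's stepping-and-clamping cursor; simpler, same cost.

-- ===== PORT A =====
-- the loop body of A, acting on the state (order, x, y); the range element is ignored
def pvStepA (width height : Int) (st : List Int × Int × Int) (_i : Int) : List Int × Int × Int :=
  let order := st.1
  let x := st.2.1
  let y := st.2.2
  let order := order ++ [y * width + x]
  if x = width - 1 ∨ y = 0 then
    let y := y + x + 1
    let x : Int := 0
    if y ≥ height then
      let x := x + (y - (height - 1))
      let y := height - 1
      (order, x, y)
    else
      (order, x, y)
  else
    (order, x + 1, y - 1)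

def diag_scan_order (width : Int) (height : Int) : List Int :=
  ((PySem.List.pyRange 0 (width * height) 1).foldl (pvStepA width height) ([], 0, 0)).1

-- ===== PORT B =====
def diag_scan_order_alt (width : Int) (height : Int) : List Int :=
  if width ≤ 0 ∨ height ≤ 0 then []
  else
  (PySem.List.pyRange 0 (width + height - 1) 1).foldl
    (fun order d =>
      (PySem.List.pyRange (max 0 (d - height + 1)) (min (width - 1) d + 1) 1).foldl
        (fun order2 x => order2 ++ [(d - x) * width + x]) order)
    []

-- ===== PRECONDITION & SPEC =====
-- When width < 0 and height < 0 (so width*height > 0), A's loop still runs width*height steps and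
-- returns a nonempty list of meaningless indices for a nonexistent grid, while B returns [], the
-- intended scan order of an empty grid.
def D_diag_scan_order (width : Int) (height : Int) : Prop := width < 0 ∧ height < 0
instance (width : Int) (height : Int) : Decidable (D_diag_scan_order width height) := by unfold D_diag_scan_order; infer_instance

def Spec_diag_scan_order (width : Int) (height : Int) (out : List Int) : Prop :=
  ¬ D_diag_scan_order width height → out = diag_scan_order_alt width height
instance (width : Int) (height : Int) (out : List Int) : Decidable (Spec_diag_scan_order width height out) := by unfold Spec_diag_scan_order; infer_instance

def pvDiffWitness_diag_scan_order : Int × Int := (-1, -1)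
def pvDiffWitnessOut_diag_scan_order : (List Int) × (List Int) := ([0], [])

-- ===== CLAIM (what is proved, stated in full; the proofs are below) =====
def Claim_unchanged_diag_scan_order : Prop := ∀ (width : Int) (height : Int), Dom_diag_scan_order width height → Spec_diag_scan_order width height (diag_scan_order width height)
def Claim_changed_diag_scan_order : Prop := Dom_diag_scan_order (pvDiffWitness_diag_scan_order.1) (pvDiffWitness_diag_scan_order.2) ∧ D_diag_scan_order (pvDiffWitness_diag_scan_order.1) (pvDiffWitness_diag_scan_order.2) ∧ diag_scan_order (pvDiffWitness_diag_scan_order.1) (pvDiffWitness_diag_scan_order.2) = pvDiffWitnessOut_diag_scan_order.1 ∧ diag_scan_order_alt (pvDiffWitness_diag_scan_order.1) (pvDiffWitness_diag_scan_order.2) = pvDiffWitnessOut_diag_scan_order.2 ∧ pvDiffWitnessOut_diag_scan_order.1 ≠ pvDiffWitnessOut_diag_scan_order.2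
def Claim_exact_diag_scan_order : Prop := ∀ (width : Int) (height : Int), Dom_diag_scan_order width height → D_diag_scan_order width height → diag_scan_order width height ≠ diag_scan_order_alt width height

-- ===== LEMMAS AND PROOFS =====

-- the state transition of A, on (x, y) alone
def pvNext (width height : Int) (x y : Int) : Int × Int :=
  if x = width - 1 ∨ y = 0 then
    let y' := y + x + 1
    if y' ≥ height then (0 + (y' - (height - 1)), height - 1) else (0, y')
  else (x + 1, y - 1)

-- A's loop run for n steps from state (x, y), emitted values only
def pvRunA (w h : Int) : Nat → Int → Int → List Int
  | 0, _, _ => []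
  | n + 1, x, y => (y * w + x) :: pvRunA w h n (pvNext w h x y).1 (pvNext w h x y).2

-- B's output from diagonal d on, r diagonals remaining
def pvDiags (w h : Int) : Nat → Int → List Int
  | 0, _ => []
  | r + 1, d =>
      (PySem.List.pyRange (max 0 (d - h + 1)) (min (w - 1) d + 1) 1).map (fun i => (d - i) * w + i)
        ++ pvDiags w h r (d + 1)

-- number of cells on diagonals d, d+1, …, d+r-1
def pvCells (w h : Int) : Nat → Int → Nat
  | 0, _ => 0
  | r + 1, d => (min (w - 1) d + 1 - max 0 (d - h + 1)).toNat + pvCells w h r (d + 1)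

lemma pvStepA_eq (w h : Int) (acc : List Int) (x y e : Int) :
    pvStepA w h (acc, x, y) e = (acc ++ [y * w + x], (pvNext w h x y).1, (pvNext w h x y).2) := by
  unfold pvStepA pvNext
  dsimp only
  split_ifs <;> rfl

lemma pvFoldA (w h : Int) : ∀ (l : List Int) (acc : List Int) (x y : Int),
    (l.foldl (pvStepA w h) (acc, x, y)).1 = acc ++ pvRunA w h l.length x y := by
  intro l
  induction l with
  | nil => intro acc x y; simp [pvRunA]
  | cons a l ih =>
      intro acc x y
      rw [List.foldl_cons, pvStepA_eq, ih]
      simp [pvRunA]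

lemma pvA_eq_run (w h : Int) : diag_scan_order w h = pvRunA w h (w * h).toNat 0 0 := by
  unfold diag_scan_order
  rw [pvFoldA]
  simp [PySem.List.length_pyRange_one]

lemma pvFoldB (w h : Int) : ∀ (r : Nat) (d : Int) (acc : List Int),
    (PySem.List.pyRange d (d + (r : Int)) 1).foldl
      (fun order dd =>
        (PySem.List.pyRange (max 0 (dd - h + 1)) (min (w - 1) dd + 1) 1).foldl
          (fun order2 x => order2 ++ [(dd - x) * w + x]) order) acc
      = acc ++ pvDiags w h r d := by
  intro r
  induction r with
  | zero => intro d acc; rw [PySem.List.pyRange_one_eq_nil (by push_cast; omega)]; simp [pvDiags]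
  | succ r ih =>
      intro d acc
      rw [PySem.List.pyRange_one_cons (by push_cast; omega), List.foldl_cons]
      rw [PySem.List.foldl_append_singleton_eq_map]
      have harg : d + ((r + 1 : Nat) : Int) = (d + 1) + (r : Int) := by push_cast; ring
      rw [harg, ih (d + 1)]
      simp [pvDiags]

lemma pvDiags_nil (w h : Int) (hwh : w ≤ 0 ∨ h ≤ 0) : ∀ (r : Nat) (d : Int), pvDiags w h r d = [] := by
  intro r
  induction r with
  | zero => intro d; rfl
  | succ r ih =>
      intro d
      show (PySem.List.pyRange _ _ 1).map _ ++ pvDiags w h r (d + 1) = []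
      rw [PySem.List.pyRange_one_eq_nil (by rcases hwh with hw | hh <;> omega), List.map_nil,
        List.nil_append, ih]

lemma pvAlt_eq (w h : Int) : diag_scan_order_alt w h = pvDiags w h (w + h - 1).toNat 0 := by
  unfold diag_scan_order_alt
  by_cases hle : w ≤ 0 ∨ h ≤ 0
  · rw [if_pos hle, pvDiags_nil w h hle]
  · rw [if_neg hle]
    have h0 : (0 : Int) + ((w + h - 1).toNat : Int) = w + h - 1 := by omega
    rw [← h0, pvFoldB]
    simp

lemma pvNext_end (w h d x : Int) (hx : x = min (w - 1) d) :
    pvNext w h x (d - x) = (max 0 (d + 1 - h + 1), d + 1 - max 0 (d + 1 - h + 1)) := by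
  unfold pvNext
  dsimp only
  rw [if_pos (by omega : x = w - 1 ∨ d - x = 0)]
  split_ifs with h2 <;> simp only [Prod.mk.injEq] <;> constructor <;> omega

lemma pvNext_mid (w h d x : Int) (hhi : x < min (w - 1) d) :
    pvNext w h x (d - x) = (x + 1, d - x - 1) := by
  unfold pvNext
  dsimp only
  rw [if_neg (by omega : ¬(x = w - 1 ∨ d - x = 0))]

lemma pvDiag (w h d : Int) :
    ∀ (k : Nat) (x : Int), x = min (w - 1) d - k → max 0 (d - h + 1) ≤ x → ∀ (n : Nat),
      pvRunA w h (k + 1 + n) x (d - x)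
        = (PySem.List.pyRange x (min (w - 1) d + 1) 1).map (fun i => (d - i) * w + i)
          ++ pvRunA w h n (max 0 (d + 1 - h + 1)) (d + 1 - max 0 (d + 1 - h + 1)) := by
  intro k
  induction k with
  | zero =>
      intro x hx hlo n
      have h1 : (0 : Nat) + 1 + n = n + 1 := by omega
      rw [h1]
      show (_ * w + x) :: pvRunA w h n (pvNext w h x (d - x)).1 (pvNext w h x (d - x)).2 = _
      rw [pvNext_end w h d x (by omega)]
      rw [PySem.List.pyRange_one_cons (by omega), PySem.List.pyRange_one_eq_nil (by omega)]
      simp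
  | succ k ih =>
      intro x hx hlo n
      have h1 : k + 1 + 1 + n = (k + 1 + n) + 1 := by omega
      rw [h1]
      show (_ * w + x) :: pvRunA w h (k + 1 + n) (pvNext w h x (d - x)).1 (pvNext w h x (d - x)).2 = _
      rw [pvNext_mid w h d x (by omega)]
      have hdx : d - x - 1 = d - (x + 1) := by ring
      rw [hdx]
      rw [ih (x + 1) (by omega) (by omega) n]
      conv_rhs => rw [PySem.List.pyRange_one_cons (show x < min (w - 1) d + 1 by omega)]
      simp

lemma pvOuter (w h : Int) (hw : 1 ≤ w) (hh : 1 ≤ h) :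
    ∀ (r : Nat) (d : Int), 0 ≤ d → d + (r : Int) = w + h - 1 →
      pvRunA w h (pvCells w h r d) (max 0 (d - h + 1)) (d - max 0 (d - h + 1)) = pvDiags w h r d := by
  intro r
  induction r with
  | zero => intro d _ _; simp [pvCells, pvDiags, pvRunA]
  | succ r ih =>
      intro d hd0 hsum
      have hdu : d ≤ w + h - 2 := by push_cast at hsum; omega
      have hlohi : max 0 (d - h + 1) ≤ min (w - 1) d := by omega
      obtain ⟨k, hk1, hk2⟩ : ∃ k : Nat,
          (min (w - 1) d + 1 - max 0 (d - h + 1)).toNat = k + 1 ∧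
            max 0 (d - h + 1) = min (w - 1) d - (k : Int) :=
        ⟨(min (w - 1) d - max 0 (d - h + 1)).toNat, by omega, by omega⟩
      have hcells : pvCells w h (r + 1) d = k + 1 + pvCells w h r (d + 1) := by
        show (min (w - 1) d + 1 - max 0 (d - h + 1)).toNat + pvCells w h r (d + 1) = _
        omega
      rw [hcells]
      rw [pvDiag w h d k (max 0 (d - h + 1)) hk2 le_rfl (pvCells w h r (d + 1))]
      rw [ih (d + 1) (by omega) (by push_cast at hsum ⊢; omega)]
      rfl

lemma pvCells_sum (w h : Int) : ∀ (r : Nat) (d : Int),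
    pvCells w h r d = ∑ i ∈ Finset.range r, (min (w - 1) (d + (i : Int)) + 1 - max 0 (d + (i : Int) - h + 1)).toNat := by
  intro r
  induction r with
  | zero => intro d; simp [pvCells]
  | succ r ih =>
      intro d
      rw [Finset.sum_range_succ']
      have hstep : ∀ i ∈ Finset.range r,
          (min (w - 1) (d + ((i + 1 : Nat) : Int)) + 1 - max 0 (d + ((i + 1 : Nat) : Int) - h + 1)).toNat
            = (min (w - 1) ((d + 1) + (i : Int)) + 1 - max 0 ((d + 1) + (i : Int) - h + 1)).toNat := by
        intro i _; push_cast; omega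
      rw [Finset.sum_congr rfl hstep, ← ih (d + 1)]
      show (min (w - 1) d + 1 - max 0 (d - h + 1)).toNat + pvCells w h r (d + 1) = _
      simp
      omega

lemma pvFiberCard (W H : Nat) (hW : 1 ≤ W) (hH : 1 ≤ H) (d : Nat) :
    (((Finset.range W) ×ˢ (Finset.range H)).filter (fun p => p.1 + p.2 = d)).card
      = (min ((W : Int) - 1) (d : Int) + 1 - max 0 ((d : Int) - (H : Int) + 1)).toNat := by
  have hset : ((Finset.range W) ×ˢ (Finset.range H)).filter (fun p => p.1 + p.2 = d)
      = (Finset.Icc (d + 1 - H) (min (W - 1) d)).image (fun x => (x, d - x)) := by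
    ext ⟨x, y⟩
    simp only [Finset.mem_filter, Finset.mem_product, Finset.mem_range, Finset.mem_image,
      Finset.mem_Icc, Prod.mk.injEq]
    constructor
    · rintro ⟨⟨hx, hy⟩, hs⟩
      exact ⟨x, by omega, rfl, by omega⟩
    · rintro ⟨a, ⟨ha1, ha2⟩, rfl, rfl⟩
      omega
  rw [hset, Finset.card_image_of_injective _ (fun a b hab => congrArg Prod.fst hab),
    Nat.card_Icc]
  omega

lemma pvGridCard (W H : Nat) :
    ∑ d ∈ Finset.range (W + H - 1),
        (((Finset.range W) ×ˢ (Finset.range H)).filter (fun p => p.1 + p.2 = d)).card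
      = W * H := by
  have hfib := Finset.card_eq_sum_card_fiberwise
      (s := (Finset.range W) ×ˢ (Finset.range H)) (t := Finset.range (W + H - 1))
      (f := fun p => p.1 + p.2)
      (fun p hp => by
        simp only [Finset.mem_coe, Finset.mem_product, Finset.mem_range] at hp ⊢
        omega)
  rw [Finset.card_product, Finset.card_range, Finset.card_range] at hfib
  exact hfib.symm

lemma pvCells_total (w h : Int) (hw : 1 ≤ w) (hh : 1 ≤ h) :
    pvCells w h (w + h - 1).toNat 0 = (w * h).toNat := by
  have hwW : ((w.toNat : Int)) = w := Int.toNat_of_nonneg (by omega)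
  have hhH : ((h.toNat : Int)) = h := Int.toNat_of_nonneg (by omega)
  rw [pvCells_sum]
  have hR : (w + h - 1).toNat = w.toNat + h.toNat - 1 := by omega
  rw [hR]
  have hpt : ∀ i ∈ Finset.range (w.toNat + h.toNat - 1),
      (min (w - 1) ((0 : Int) + (i : Int)) + 1 - max 0 ((0 : Int) + (i : Int) - h + 1)).toNat
        = (((Finset.range w.toNat) ×ˢ (Finset.range h.toNat)).filter (fun p => p.1 + p.2 = i)).card := by
    intro i _
    rw [pvFiberCard w.toNat h.toNat (by omega) (by omega) i]
    omega
  rw [Finset.sum_congr rfl hpt, pvGridCard]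
  have : ((w.toNat * h.toNat : Nat) : Int) = w * h := by push_cast; rw [hwW, hhH]
  omega

-- ===== VERDICT (by name: the statement is the Claim_ definition above) =====
theorem diag_scan_order_spec : Claim_unchanged_diag_scan_order := by
  intro w h _ hD
  show diag_scan_order w h = diag_scan_order_alt w h
  rw [pvA_eq_run, pvAlt_eq]
  by_cases hpos : 1 ≤ w ∧ 1 ≤ h
  · obtain ⟨hw, hh⟩ := hpos
    have h0 := pvOuter w h hw hh (w + h - 1).toNat 0 le_rfl (by omega)
    have hlo : max (0 : Int) (0 - h + 1) = 0 := by omega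
    rw [hlo, sub_zero] at h0
    rw [← pvCells_total w h hw hh]
    exact h0
  · have hD' : ¬(w < 0 ∧ h < 0) := hD
    have hwh : w ≤ 0 ∨ h ≤ 0 := by omega
    have hmul : w * h ≤ 0 := by
      rcases hwh with hw | hh
      · rcases lt_or_ge w 0 with hw' | hw'
        · exact mul_nonpos_of_nonpos_of_nonneg hw (by omega)
        · have : w = 0 := by omega
          simp [this]
      · rcases lt_or_ge h 0 with hh' | hh'
        · exact mul_nonpos_of_nonneg_of_nonpos (by omega) hh
        · have : h = 0 := by omega
          simp [this]
    have h0 : (w * h).toNat = 0 := by omega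
    rw [h0, pvDiags_nil w h hwh]
    rfl

theorem diag_scan_order_changed : Claim_changed_diag_scan_order := by
  unfold Claim_changed_diag_scan_order; decide

theorem diag_scan_order_tight : Claim_exact_diag_scan_order := by
  intro w h _ hD
  obtain ⟨hw, hh⟩ := hD
  have hpos : 0 < w * h := mul_pos_of_neg_of_neg hw hh
  obtain ⟨m, hm⟩ : ∃ m, (w * h).toNat = m + 1 := ⟨(w * h).toNat - 1, by omega⟩
  rw [pvA_eq_run, pvAlt_eq, hm, pvDiags_nil w h (Or.inl (by omega))]
  simp [pvRunA]
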